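-- pv_equiv track=rewrite | github.com/ZihuaMeng/gfm_safety_core | scripts/ingest_layer2_hpc_results.py | _overall_status
-- ===== SOURCE A (Python) =====
-- from typing import Any
--
-- TARGET_STATUS_FRESH_COMPLETE = "fresh_hpc_rerun_complete"
--
-- TARGET_STATUS_PREEXISTING = "ready_preexisting_local_execution"
--
-- TARGET_STATUS_MISSING_PROVENANCE = "fresh_hpc_rerun_missing_provenance"
--
-- TARGET_STATUS_MISSING_OUTPUTS = "missing_outputs"
--
-- TARGET_STATUS_STALE_OR_MISMATCHED = "stale_or_mismatched_outputs"
--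
-- LAUNCH_STATUS_MIXED = "mixed_target_statuses"
--
-- def _overall_status(targets: list[dict[str, Any]]) -> str:
--     statuses = {target["status"] for target in targets}
--     if statuses == {TARGET_STATUS_FRESH_COMPLETE}:
--         return TARGET_STATUS_FRESH_COMPLETE
--     if statuses == {TARGET_STATUS_PREEXISTING}:
--         return TARGET_STATUS_PREEXISTING
--     if statuses == {TARGET_STATUS_MISSING_OUTPUTS}:
--         return TARGET_STATUS_MISSING_OUTPUTS
--     if TARGET_STATUS_STALE_OR_MISMATCHED in statuses:
--         return TARGET_STATUS_STALE_OR_MISMATCHED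
--     if TARGET_STATUS_FRESH_COMPLETE in statuses:
--         return f"partial_{TARGET_STATUS_FRESH_COMPLETE}"
--     if TARGET_STATUS_MISSING_PROVENANCE in statuses:
--         return TARGET_STATUS_MISSING_PROVENANCE
--     return LAUNCH_STATUS_MIXED
-- ===== SOURCE B (Python) =====
-- from typing import Any
--
-- TARGET_STATUS_FRESH_COMPLETE = "fresh_hpc_rerun_complete"
-- TARGET_STATUS_PREEXISTING = "ready_preexisting_local_execution"
-- TARGET_STATUS_MISSING_PROVENANCE = "fresh_hpc_rerun_missing_provenance"
-- TARGET_STATUS_MISSING_OUTPUTS = "missing_outputs"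
-- TARGET_STATUS_STALE_OR_MISMATCHED = "stale_or_mismatched_outputs"
-- LAUNCH_STATUS_MIXED = "mixed_target_statuses"
--
-- def _overall_status(targets: list[dict[str, Any]]) -> str:
--     # Single pass accumulating per-status counts, then an arithmetic decision
--     # (reordered: 'stale anywhere' dominates, then fresh full/partial, etc.).
--     n = fresh = pre = missing = stale = prov = 0
--     for t in targets:
--         s = t["status"]
--         n += 1
--         fresh += s == TARGET_STATUS_FRESH_COMPLETE
--         pre += s == TARGET_STATUS_PREEXISTING
--         missing += s == TARGET_STATUS_MISSING_OUTPUTS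
--         stale += s == TARGET_STATUS_STALE_OR_MISMATCHED
--         prov += s == TARGET_STATUS_MISSING_PROVENANCE
--     if stale:
--         return TARGET_STATUS_STALE_OR_MISMATCHED
--     if fresh:
--         if fresh == n:
--             return TARGET_STATUS_FRESH_COMPLETE
--         return f"partial_{TARGET_STATUS_FRESH_COMPLETE}"
--     if n and pre == n:
--         return TARGET_STATUS_PREEXISTING
--     if n and missing == n:
--         return TARGET_STATUS_MISSING_OUTPUTS
--     if prov:
--         return TARGET_STATUS_MISSING_PROVENANCE
--     return LAUNCH_STATUS_MIXED
-- ===== Notes on version B (the rewrite author's own statement) =====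
-- stated objective: alternative
-- what changed: B replaces A's build-a-set-of-statuses-then-test-it shape by a single counting pass that tallies each status, followed by a reordered arithmetic decision on the counts (stale-anywhere dominates, then fresh full/partial, then all-preexisting, all-missing, provenance, mixed).
import Mathlib
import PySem

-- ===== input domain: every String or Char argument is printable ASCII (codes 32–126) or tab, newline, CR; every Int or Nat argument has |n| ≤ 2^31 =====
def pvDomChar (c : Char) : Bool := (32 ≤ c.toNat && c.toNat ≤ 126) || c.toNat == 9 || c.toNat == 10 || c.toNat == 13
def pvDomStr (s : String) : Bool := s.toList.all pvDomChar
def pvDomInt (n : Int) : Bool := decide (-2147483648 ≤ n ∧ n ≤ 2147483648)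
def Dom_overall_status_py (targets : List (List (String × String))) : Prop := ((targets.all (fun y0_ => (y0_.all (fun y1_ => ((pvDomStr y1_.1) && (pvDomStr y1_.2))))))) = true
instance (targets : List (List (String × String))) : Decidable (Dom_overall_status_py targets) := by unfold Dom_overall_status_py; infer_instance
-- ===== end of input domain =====

-- B replaces A's build-a-status-set-then-test-it shape by a single counting pass
-- (per-status tallies) followed by a reordered arithmetic decision (alternative).

-- ===== PORT A =====
-- t["status"] (shared by both ports): exact under Pre_ (KeyError, a missing "status" key, is excluded)
def aStatus (t : List (String × String)) : String :=
  ((PySem.Dict.mk t).get? "status").getD ""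

-- statuses = {target["status"] for target in targets}
def aStatuses (targets : List (List (String × String))) : PySem.Set String :=
  PySem.Set.ofList (targets.map aStatus)

def overall_status_py (targets : List (List (String × String))) : String :=
  if PySem.Set.equal (aStatuses targets) ["fresh_hpc_rerun_complete"] then "fresh_hpc_rerun_complete"
  else if PySem.Set.equal (aStatuses targets) ["ready_preexisting_local_execution"] then "ready_preexisting_local_execution"
  else if PySem.Set.equal (aStatuses targets) ["missing_outputs"] then "missing_outputs"
  else if PySem.Set.contains (aStatuses targets) "stale_or_mismatched_outputs" then "stale_or_mismatched_outputs"
  else if PySem.Set.contains (aStatuses targets) "fresh_hpc_rerun_complete" then "partial_fresh_hpc_rerun_complete"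
  else if PySem.Set.contains (aStatuses targets) "fresh_hpc_rerun_missing_provenance" then "fresh_hpc_rerun_missing_provenance"
  else "mixed_target_statuses"

-- ===== PORT B =====
-- the counting loop: state (n, fresh, pre, missing, stale, prov)
def bCounts (targets : List (List (String × String))) : Int × Int × Int × Int × Int × Int :=
  targets.foldl
    (fun st t =>
      let s := aStatus t
      (st.1 + 1,
       st.2.1 + (if s == "fresh_hpc_rerun_complete" then 1 else 0),
       st.2.2.1 + (if s == "ready_preexisting_local_execution" then 1 else 0),
       st.2.2.2.1 + (if s == "missing_outputs" then 1 else 0),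
       st.2.2.2.2.1 + (if s == "stale_or_mismatched_outputs" then 1 else 0),
       st.2.2.2.2.2 + (if s == "fresh_hpc_rerun_missing_provenance" then 1 else 0)))
    (0, 0, 0, 0, 0, 0)

def overall_status_py_alt (targets : List (List (String × String))) : String :=
  let c := bCounts targets
  let n := c.1; let fresh := c.2.1; let pre := c.2.2.1
  let missing := c.2.2.2.1; let stale := c.2.2.2.2.1; let prov := c.2.2.2.2.2
  if stale ≠ 0 then "stale_or_mismatched_outputs"
  else if fresh ≠ 0 then
    if fresh = n then "fresh_hpc_rerun_complete"
    else "partial_fresh_hpc_rerun_complete"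
  else if n ≠ 0 ∧ pre = n then "ready_preexisting_local_execution"
  else if n ≠ 0 ∧ missing = n then "missing_outputs"
  else if prov ≠ 0 then "fresh_hpc_rerun_missing_provenance"
  else "mixed_target_statuses"

-- ===== PRECONDITION & SPEC =====
-- Pre_ excludes exactly the inputs where target["status"] raises KeyError: some target has no "status" key.
def Pre_overall_status_py (targets : List (List (String × String))) : Prop :=
  (targets.all (fun t => ((PySem.Dict.mk t).get? "status").isSome)) = true
instance (targets : List (List (String × String))) : Decidable (Pre_overall_status_py targets) := by unfold Pre_overall_status_py; infer_instance

def pvWitness_overall_status_py : (List (List (String × String))) :=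
  [[("status", "fresh_hpc_rerun_complete")], [("status", "missing_outputs")]]

def Spec_overall_status_py (targets : List (List (String × String))) (out : String) : Prop := out = overall_status_py_alt targets
instance (targets : List (List (String × String))) (out : String) : Decidable (Spec_overall_status_py targets out) := by unfold Spec_overall_status_py; infer_instance

-- ===== CLAIM (what is proved, stated in full; the proofs are below) =====
def Claim_equal_overall_status_py : Prop := ∀ (targets : List (List (String × String))), Dom_overall_status_py targets → Pre_overall_status_py targets → Spec_overall_status_py targets (overall_status_py targets)

-- ===== LEMMAS AND PROOFS =====

-- set(l) == {x}  ⟺  l is non-empty and every element is x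
theorem setEqSingleton (l : List String) (x : String) :
    PySem.Set.equal (PySem.Set.ofList l) [x] = true ↔ (l ≠ [] ∧ ∀ y ∈ l, y = x) := by
  rw [PySem.Set.equal_iff]
  simp only [PySem.Set.mem_ofList, List.mem_singleton]
  constructor
  · intro h
    have hx : x ∈ l := (h x).mpr rfl
    exact ⟨List.ne_nil_of_mem hx, fun y hy => (h y).mp hy⟩
  · rintro ⟨hne, hall⟩ z
    constructor
    · exact fun hz => hall z hz
    · rintro rfl
      obtain ⟨y, hy⟩ := List.exists_mem_of_ne_nil l hne
      have := hall y hy; subst this; exact hy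

-- x in set(l)  ⟺  x in l
theorem setContains (l : List String) (x : String) :
    PySem.Set.contains (PySem.Set.ofList l) x = true ↔ x ∈ l := by
  rw [PySem.Set.contains_iff, PySem.Set.mem_ofList]

-- the counting fold computes length and countP of the mapped status list
theorem bCounts_eq (targets : List (List (String × String))) :
    bCounts targets =
      ((targets.length : Int),
       ((targets.map aStatus).countP (· == "fresh_hpc_rerun_complete") : Int),
       ((targets.map aStatus).countP (· == "ready_preexisting_local_execution") : Int),
       ((targets.map aStatus).countP (· == "missing_outputs") : Int),
       ((targets.map aStatus).countP (· == "stale_or_mismatched_outputs") : Int),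
       ((targets.map aStatus).countP (· == "fresh_hpc_rerun_missing_provenance") : Int)) := by
  unfold bCounts
  induction targets using List.reverseRecOn with
  | nil => rfl
  | append_singleton xs x ih =>
      simp only [List.foldl_append, List.foldl_cons, List.foldl_nil, ih, List.map_append,
        List.countP_append, List.length_append, List.map_cons, List.map_nil,
        List.countP_cons, List.countP_nil, List.length_cons, List.length_nil]
      split_ifs <;> simp

theorem countP_eq_len_iff (l : List String) (x : String) :
    (l.countP (· == x) : Int) = (l.length : Int) ↔ ∀ y ∈ l, y = x := by
  rw [Int.natCast_inj, List.countP_eq_length]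
  simp

theorem countP_ne_zero_iff (l : List String) (x : String) :
    ((l.countP (· == x) : Int) ≠ 0) ↔ x ∈ l := by
  rw [ne_eq, Int.natCast_eq_zero, ← ne_eq, ← Nat.pos_iff_ne_zero, List.countP_pos_iff]
  exact ⟨fun ⟨a, ha, e⟩ => (beq_iff_eq.mp e) ▸ ha, fun h => ⟨x, h, beq_self_eq_true x⟩⟩

-- ===== VERDICT (by name: the statement is the Claim_ definition above) =====
theorem overall_status_py_spec : Claim_equal_overall_status_py := by
  intro targets _ _
  unfold Spec_overall_status_py overall_status_py overall_status_py_alt aStatuses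
  simp only [bCounts_eq]
  set l := targets.map aStatus with hl
  have hlen : l.length = targets.length := by rw [hl, List.length_map]
  -- close a leaf where the B-side condition c := (↑(countP (· == x) l) ≠ 0) must be resolved
  by_cases hS : "stale_or_mismatched_outputs" ∈ l
  · -- stale present
    have hbS : ((l.countP (· == "stale_or_mismatched_outputs") : Int) ≠ 0) :=
      (countP_ne_zero_iff _ _).mpr hS
    have hnotF : ¬ (PySem.Set.equal (PySem.Set.ofList l) ["fresh_hpc_rerun_complete"] = true) := by
      rw [setEqSingleton]; rintro ⟨_, hall⟩; exact absurd (hall _ hS) (by decide)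
    have hnotP : ¬ (PySem.Set.equal (PySem.Set.ofList l) ["ready_preexisting_local_execution"] = true) := by
      rw [setEqSingleton]; rintro ⟨_, hall⟩; exact absurd (hall _ hS) (by decide)
    have hnotM : ¬ (PySem.Set.equal (PySem.Set.ofList l) ["missing_outputs"] = true) := by
      rw [setEqSingleton]; rintro ⟨_, hall⟩; exact absurd (hall _ hS) (by decide)
    have hC : PySem.Set.contains (PySem.Set.ofList l) "stale_or_mismatched_outputs" = true :=
      (setContains _ _).mpr hS
    rw [if_neg hnotF, if_neg hnotP, if_neg hnotM, if_pos hC, if_pos hbS]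
  · have hbS : ¬ ((l.countP (· == "stale_or_mismatched_outputs") : Int) ≠ 0) := by
      rw [countP_ne_zero_iff]; exact hS
    have hCS : ¬ (PySem.Set.contains (PySem.Set.ofList l) "stale_or_mismatched_outputs" = true) := by
      rw [setContains]; exact hS
    by_cases hF : "fresh_hpc_rerun_complete" ∈ l
    · have hbF : ((l.countP (· == "fresh_hpc_rerun_complete") : Int) ≠ 0) :=
        (countP_ne_zero_iff _ _).mpr hF
      have hnotP : ¬ (PySem.Set.equal (PySem.Set.ofList l) ["ready_preexisting_local_execution"] = true) := by
        rw [setEqSingleton]; rintro ⟨_, hall⟩; exact absurd (hall _ hF) (by decide)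
      have hnotM : ¬ (PySem.Set.equal (PySem.Set.ofList l) ["missing_outputs"] = true) := by
        rw [setEqSingleton]; rintro ⟨_, hall⟩; exact absurd (hall _ hF) (by decide)
      have hCF : PySem.Set.contains (PySem.Set.ofList l) "fresh_hpc_rerun_complete" = true :=
        (setContains _ _).mpr hF
      by_cases hAllF : ∀ y ∈ l, y = "fresh_hpc_rerun_complete"
      · have hEq : PySem.Set.equal (PySem.Set.ofList l) ["fresh_hpc_rerun_complete"] = true :=
          (setEqSingleton _ _).mpr ⟨List.ne_nil_of_mem hF, hAllF⟩
        have hc : ((l.countP (· == "fresh_hpc_rerun_complete") : Int) = (targets.length : Int)) := by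
          rw [← hlen]; exact (countP_eq_len_iff _ _).mpr hAllF
        rw [if_pos hEq, if_neg hbS, if_pos hbF, if_pos hc]
      · have hnEq : ¬ (PySem.Set.equal (PySem.Set.ofList l) ["fresh_hpc_rerun_complete"] = true) := by
          rw [setEqSingleton]; rintro ⟨_, hall⟩; exact hAllF hall
        have hc : ¬ ((l.countP (· == "fresh_hpc_rerun_complete") : Int) = (targets.length : Int)) := by
          rw [← hlen, countP_eq_len_iff]; exact hAllF
        rw [if_neg hnEq, if_neg hnotP, if_neg hnotM, if_neg hCS, if_pos hCF,
            if_neg hbS, if_pos hbF, if_neg hc]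
    · -- no stale, no fresh
      have hbF : ¬ ((l.countP (· == "fresh_hpc_rerun_complete") : Int) ≠ 0) := by
        rw [countP_ne_zero_iff]; exact hF
      have hnEqF : ¬ (PySem.Set.equal (PySem.Set.ofList l) ["fresh_hpc_rerun_complete"] = true) := by
        rw [setEqSingleton]
        rintro ⟨hne, hall⟩
        obtain ⟨y, hy⟩ := List.exists_mem_of_ne_nil l hne
        exact hF ((hall y hy) ▸ hy)
      have hCF : ¬ (PySem.Set.contains (PySem.Set.ofList l) "fresh_hpc_rerun_complete" = true) := by
        rw [setContains]; exact hF
      by_cases hAllP : l ≠ [] ∧ ∀ y ∈ l, y = "ready_preexisting_local_execution"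
      · have hEq : PySem.Set.equal (PySem.Set.ofList l) ["ready_preexisting_local_execution"] = true :=
          (setEqSingleton _ _).mpr hAllP
        have hbP : ((targets.length : Int) ≠ 0 ∧ (l.countP (· == "ready_preexisting_local_execution") : Int) = (targets.length : Int)) := by
          refine ⟨?_, by rw [← hlen]; exact (countP_eq_len_iff _ _).mpr hAllP.2⟩
          rw [Int.natCast_ne_zero, ← hlen]
          exact fun h => hAllP.1 (List.length_eq_zero_iff.mp h)
        rw [if_neg hnEqF, if_pos hEq, if_neg hbS, if_neg hbF, if_pos hbP]
      · have hnEqP : ¬ (PySem.Set.equal (PySem.Set.ofList l) ["ready_preexisting_local_execution"] = true) := by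
          rw [setEqSingleton]; exact hAllP
        have hbP : ¬ ((targets.length : Int) ≠ 0 ∧ (l.countP (· == "ready_preexisting_local_execution") : Int) = (targets.length : Int)) := by
          rw [← hlen, countP_eq_len_iff, Int.natCast_ne_zero]
          rintro ⟨hne, hall⟩
          exact hAllP ⟨fun h => hne (by simp [h]), hall⟩
        by_cases hAllM : l ≠ [] ∧ ∀ y ∈ l, y = "missing_outputs"
        · have hEq : PySem.Set.equal (PySem.Set.ofList l) ["missing_outputs"] = true :=
            (setEqSingleton _ _).mpr hAllM
          have hbM : ((targets.length : Int) ≠ 0 ∧ (l.countP (· == "missing_outputs") : Int) = (targets.length : Int)) := by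
            refine ⟨?_, by rw [← hlen]; exact (countP_eq_len_iff _ _).mpr hAllM.2⟩
            rw [Int.natCast_ne_zero, ← hlen]
            exact fun h => hAllM.1 (List.length_eq_zero_iff.mp h)
          rw [if_neg hnEqF, if_neg hnEqP, if_pos hEq, if_neg hbS, if_neg hbF, if_neg hbP, if_pos hbM]
        · have hnEqM : ¬ (PySem.Set.equal (PySem.Set.ofList l) ["missing_outputs"] = true) := by
            rw [setEqSingleton]; exact hAllM
          have hbM : ¬ ((targets.length : Int) ≠ 0 ∧ (l.countP (· == "missing_outputs") : Int) = (targets.length : Int)) := by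
            rw [← hlen, countP_eq_len_iff, Int.natCast_ne_zero]
            rintro ⟨hne, hall⟩
            exact hAllM ⟨fun h => hne (by simp [h]), hall⟩
          by_cases hV : "fresh_hpc_rerun_missing_provenance" ∈ l
          · have hCV : PySem.Set.contains (PySem.Set.ofList l) "fresh_hpc_rerun_missing_provenance" = true :=
              (setContains _ _).mpr hV
            have hbV : ((l.countP (· == "fresh_hpc_rerun_missing_provenance") : Int) ≠ 0) :=
              (countP_ne_zero_iff _ _).mpr hV
            rw [if_neg hnEqF, if_neg hnEqP, if_neg hnEqM, if_neg hCS, if_neg hCF, if_pos hCV,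
                if_neg hbS, if_neg hbF, if_neg hbP, if_neg hbM, if_pos hbV]
          · have hCV : ¬ (PySem.Set.contains (PySem.Set.ofList l) "fresh_hpc_rerun_missing_provenance" = true) := by
              rw [setContains]; exact hV
            have hbV : ¬ ((l.countP (· == "fresh_hpc_rerun_missing_provenance") : Int) ≠ 0) := by
              rw [countP_ne_zero_iff]; exact hV
            rw [if_neg hnEqF, if_neg hnEqP, if_neg hnEqM, if_neg hCS, if_neg hCF, if_neg hCV,
                if_neg hbS, if_neg hbF, if_neg hbP, if_neg hbM, if_neg hbV]
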